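-- pv_equiv track=rewrite | github.com/KhiopsML/khiops-python | khiops/core/internals/version.py | _is_simple_number
-- ===== SOURCE A (Python) =====
-- def _is_simple_number(string):
--     """Tests if a string contains only characters [0-9] and no left zeroes
--
--     note::
--         We do not use str.isdigit() because it returns ``True`` for digit-like UTF-8
--         characters (fractions and superscripts for example).
--     """
--     if string:
--         all_chars = all(char in "0123456789" for char in string)
--         no_left_zeroes = not string.startswith("0") or string == "0"
--         is_simple_number = all_chars and no_left_zeroes
--     else:
--         is_simple_number = False
--     return is_simple_number
-- ===== SOURCE B (Python) =====
-- import re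
--
-- def _is_simple_number(string):
--     # Single regex full-match: "0" or a nonzero digit followed by digits.
--     return bool(re.fullmatch(r"0|[1-9][0-9]*", string))
-- ===== Notes on version B (the rewrite author's own statement) =====
-- stated objective: idiomatic
-- what changed: Replaced the explicit per-character scan and startswith/equality checks with a single regular-expression full match of the pattern 0|[1-9][0-9]*.
import Mathlib
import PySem

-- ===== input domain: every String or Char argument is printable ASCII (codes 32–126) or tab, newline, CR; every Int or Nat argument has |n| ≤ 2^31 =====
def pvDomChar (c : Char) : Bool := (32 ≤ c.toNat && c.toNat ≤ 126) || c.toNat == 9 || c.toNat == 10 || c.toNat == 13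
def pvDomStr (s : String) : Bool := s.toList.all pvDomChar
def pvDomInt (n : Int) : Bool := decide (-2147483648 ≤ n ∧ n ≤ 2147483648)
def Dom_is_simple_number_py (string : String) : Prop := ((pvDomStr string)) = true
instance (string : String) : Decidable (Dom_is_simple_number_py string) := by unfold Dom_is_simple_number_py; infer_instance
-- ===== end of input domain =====

-- B replaces A's per-character scan plus startswith/equality checks with a single
-- regex full match of "0|[1-9][0-9]*" (more idiomatic); same result on every string.

-- ===== PORT A =====
-- literal port: if string: all(char in "0123456789" …) and (not startswith("0") or == "0")
def is_simple_number_py (string : String) : Bool :=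
  if string.toList ≠ [] then
    let all_chars := string.toList.all (fun c => ("0123456789".toList).contains c)
    let no_left_zeroes := !(PySem.Str.startswith string "0") || (string == "0")
    all_chars && no_left_zeroes
  else
    false

-- ===== PORT B =====
-- hand port of the regex fullmatch "0|[1-9][0-9]*" (exact: alternative 1 is the single
-- char '0' consuming the whole string; alternative 2 is one char in [1-9] then any
-- number of chars in [0-9], anchored at both ends by fullmatch)
def is_simple_number_py_alt (string : String) : Bool :=
  match string.toList with
  | [] => false
  | c :: rest =>
      (c == '0' && rest.isEmpty) ||
      (('1' ≤ c && c ≤ '9') && rest.all (fun d => '0' ≤ d && d ≤ '9'))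

-- ===== PRECONDITION & SPEC =====
def Spec_is_simple_number_py (string : String) (out : Bool) : Prop := out = is_simple_number_py_alt string
instance (string : String) (out : Bool) : Decidable (Spec_is_simple_number_py string out) := by unfold Spec_is_simple_number_py; infer_instance

-- ===== CLAIM (what is proved, stated in full; the proofs are below) =====
def Claim_equal_is_simple_number_py : Prop := ∀ (string : String), Dom_is_simple_number_py string → Spec_is_simple_number_py string (is_simple_number_py string)

-- ===== LEMMAS AND PROOFS =====

theorem pv_digit_mem (c : Char) :
    (("0123456789".toList).contains c) = ('0' ≤ c && c ≤ '9') := by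
  simp only [show "0123456789".toList = ['0','1','2','3','4','5','6','7','8','9'] from rfl]
  rw [Bool.eq_iff_iff]
  simp only [List.contains_cons, List.contains_nil, Bool.or_false, Bool.or_eq_true,
    beq_iff_eq, Bool.and_eq_true, decide_eq_true_eq, Char.le_def, Char.ext_iff,
    UInt32.le_iff_toNat_le, UInt32.ext_iff, Char.reduceVal, UInt32.reduceToNat]
  omega

theorem pv_le_one_of_ne_zero (c : Char) (hcne : c ≠ '0') :
    (('0' ≤ c) : Bool) = (('1' ≤ c) : Bool) := by
  have hv : c.val.toNat ≠ 48 := by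
    intro hx
    exact hcne (Char.ext (UInt32.ext_iff.mpr hx))
  simp only [decide_eq_decide, Char.le_def, UInt32.le_iff_toNat_le,
    Char.reduceVal, UInt32.reduceToNat]
  omega

theorem pv_startswith_cons (s : String) (c : Char) (rest : List Char)
    (h : s.toList = c :: rest) :
    PySem.Str.startswith s "0" = (c == '0') := by
  rw [PySem.Str.startswith_eq, h]
  by_cases hc : c = '0'
  · subst hc
    simp only [beq_self_eq_true]
    exact (PySem.Chars.startswith_iff _ _).mpr ⟨rest, rfl⟩
  · rw [show ((c == '0') = false) from by simpa using hc]
    rw [← Bool.not_eq_true]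
    intro habs
    rcases (PySem.Chars.startswith_iff _ _).mp habs with ⟨t, ht⟩
    rw [show ("0".toList) = ['0'] from rfl] at ht
    injection ht with h1 _
    exact hc h1.symm

theorem pv_eq_zero_str (s : String) (c : Char) (rest : List Char)
    (h : s.toList = c :: rest) :
    (s == "0") = (c == '0' && rest.isEmpty) := by
  rw [Bool.eq_iff_iff]
  simp only [beq_iff_eq, Bool.and_eq_true, List.isEmpty_iff]
  constructor
  · intro hs
    subst hs
    rw [show ("0".toList) = ['0'] from rfl] at h
    injection h with h1 h2
    exact ⟨h1.symm, h2.symm⟩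
  · rintro ⟨h1, h2⟩
    subst h1; subst h2
    exact String.toList_inj.mp h

-- ===== VERDICT (by name: the statement is the Claim_ definition above) =====
theorem is_simple_number_py_spec : Claim_equal_is_simple_number_py := by
  intro s _
  unfold Spec_is_simple_number_py is_simple_number_py is_simple_number_py_alt
  rcases h : s.toList with _ | ⟨c, rest⟩
  · simp
  · simp only [ne_eq, reduceCtorEq, not_false_eq_true, if_pos]
    rw [pv_startswith_cons s c rest h, pv_eq_zero_str s c rest h]
    simp only [List.all_cons, pv_digit_mem]
    by_cases hc : c = '0'
    · subst hc
      simp only [beq_self_eq_true, Bool.true_and, Bool.not_true, Bool.false_or]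
      by_cases hr : rest = []
      · subst hr
        simp only [List.all_nil, Bool.and_true, List.isEmpty_nil]
        rw [show ((('0':Char) ≤ '0' && ('0':Char) ≤ '9') : Bool) = true from by decide,
            show ((('1':Char) ≤ '0') : Bool) = false from by decide]
        simp
      · rw [show (rest.isEmpty = false) from by simpa using hr,
            show ((('1':Char) ≤ '0') : Bool) = false from by decide]
        simp
    · rw [show ((c == '0') = false) from by simpa using hc]
      simp only [Bool.false_and, Bool.not_false, Bool.true_or, Bool.and_true, Bool.false_or]
      by_cases h9 : (c ≤ '9' : Bool) = true
      · rw [show ((('0':Char) ≤ c && c ≤ '9') : Bool)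
              = (('1':Char) ≤ c && c ≤ '9') from by
            rw [pv_le_one_of_ne_zero c hc]]
      · rw [show ((c ≤ '9' : Bool)) = false from by simpa using h9]
        simp
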